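-- pv_equiv track=rewrite | github.com/imndevmodeai/ResonantiA-v3 | Four_PointO_ArchE_backup_20250905_072318/_backup_20250905_072056/_backup_20250905_071918/workflow/engine.py | _find_next_task
-- ===== SOURCE A (Python) =====
-- def _find_next_task(all_tasks, executed_tasks, last_executed=None):
--     """Finds the next task to run in a simple sequential or dependency-based order."""
--     if last_executed:
--          # Find tasks that depend on the last executed one
--         for task_name, task_data in all_tasks.items():
--             if task_name not in executed_tasks and last_executed in task_data.get('dependencies', []):
--                 # Check if all other dependencies are also met
--                 if all(dep in executed_tasks for dep in task_data.get('dependencies', [])):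
--                     return task_name
--
--     # Fallback to the first unexecuted task in the original order
--     for task_name in all_tasks:
--         if task_name not in executed_tasks:
--             task_data = all_tasks[task_name]
--             if all(dep in executed_tasks for dep in task_data.get('dependencies', [])):
--                  return task_name
--     return None
-- ===== SOURCE B (Python) =====
-- def _find_next_task(all_tasks, executed_tasks, last_executed=None):
--     """Single pass: return immediately on a ready task depending on last_executed,
--     otherwise remember the first ready task as fallback."""
--     fallback = None
--     for task_name, task_data in all_tasks.items():
--         if task_name in executed_tasks:
--             continue
--         deps = task_data.get('dependencies', [])
--         if not all(dep in executed_tasks for dep in deps):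
--             continue
--         if last_executed and last_executed in deps:
--             return task_name
--         if fallback is None:
--             fallback = task_name
--     return fallback
-- ===== Notes on version B (the rewrite author's own statement) =====
-- stated objective: simpler
-- what changed: Merges A's two scans (first the ready tasks depending on last_executed, then the first ready task) into one pass over all_tasks.items() that returns immediately on a ready task depending on last_executed and otherwise remembers the first ready task in a fallback variable.
import Mathlib
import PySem

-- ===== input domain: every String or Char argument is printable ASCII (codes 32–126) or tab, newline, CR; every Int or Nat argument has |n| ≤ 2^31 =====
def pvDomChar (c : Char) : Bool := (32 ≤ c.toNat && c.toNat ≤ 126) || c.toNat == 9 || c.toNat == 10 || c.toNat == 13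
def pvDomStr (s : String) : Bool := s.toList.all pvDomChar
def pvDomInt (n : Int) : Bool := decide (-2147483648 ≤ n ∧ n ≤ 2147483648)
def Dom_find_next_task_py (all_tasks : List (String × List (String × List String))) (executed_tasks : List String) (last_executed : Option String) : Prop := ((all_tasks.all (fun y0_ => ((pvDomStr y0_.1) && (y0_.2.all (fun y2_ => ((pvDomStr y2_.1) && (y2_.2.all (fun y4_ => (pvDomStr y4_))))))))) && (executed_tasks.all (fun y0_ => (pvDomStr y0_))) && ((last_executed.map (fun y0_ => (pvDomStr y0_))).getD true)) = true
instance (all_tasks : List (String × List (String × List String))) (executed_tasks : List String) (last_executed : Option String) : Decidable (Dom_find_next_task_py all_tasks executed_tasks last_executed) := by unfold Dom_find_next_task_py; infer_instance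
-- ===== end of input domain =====

-- B merges A's two scans into one pass with a fallback variable; objective: simpler (same asymptotic cost).

-- ===== PORT A =====
-- task_data.get('dependencies', []) : first-match association-list lookup with default []
def pvGetDeps (task_data : List (String × List String)) : List String :=
  ((task_data.find? (fun p => p.1 == "dependencies")).map Prod.snd).getD []

-- phase 1 of A: first unexecuted task whose dependencies contain l and are all executed
def pvPhase1 (items : List (String × List (String × List String))) (executed_tasks : List String) (l : String) : Option String :=
  match items with
  | [] => none
  | (name, data) :: rest =>
    if !executed_tasks.contains name && (pvGetDeps data).contains l then
      if (pvGetDeps data).all (fun dep => executed_tasks.contains dep) then some name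
      else pvPhase1 rest executed_tasks l
    else pvPhase1 rest executed_tasks l

-- phase 2 of A: iterate the keys, look each task_data up via all_tasks[task_name]
def pvPhase2 (all_tasks items : List (String × List (String × List String))) (executed_tasks : List String) : Option String :=
  match items with
  | [] => none
  | (name, _) :: rest =>
    if !executed_tasks.contains name then
      -- all_tasks[task_name]: first-match lookup in the full dict (always succeeds for an iterated key)
      let data := ((all_tasks.find? (fun p => p.1 == name)).map Prod.snd).getD []
      if (pvGetDeps data).all (fun dep => executed_tasks.contains dep) then some name
      else pvPhase2 all_tasks rest executed_tasks
    else pvPhase2 all_tasks rest executed_tasks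

def find_next_task_py (all_tasks : List (String × List (String × List String))) (executed_tasks : List String) (last_executed : Option String) : Option String :=
  -- `if last_executed:` — truthy means some non-empty string
  let r : Option String :=
    match last_executed with
    | some l => if l ≠ "" then pvPhase1 all_tasks executed_tasks l else none
    | none => none
  match r with
  | some t => some t
  | none => pvPhase2 all_tasks all_tasks executed_tasks

-- ===== PORT B =====
-- single pass with a fallback accumulator (transcription of Source B's loop)
def pvBLoop (items : List (String × List (String × List String))) (executed_tasks : List String) (last_executed : Option String) (fallback : Option String) : Option String :=
  match items with
  | [] => fallback
  | (name, data) :: rest =>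
    if executed_tasks.contains name then pvBLoop rest executed_tasks last_executed fallback
    else
      let deps := pvGetDeps data
      if !(deps.all (fun dep => executed_tasks.contains dep)) then
        pvBLoop rest executed_tasks last_executed fallback
      else if (match last_executed with | some l => l ≠ "" && deps.contains l | none => false) then
        some name
      else
        pvBLoop rest executed_tasks last_executed
          (match fallback with | none => some name | some _ => fallback)

def find_next_task_py_alt (all_tasks : List (String × List (String × List String))) (executed_tasks : List String) (last_executed : Option String) : Option String :=
  pvBLoop all_tasks executed_tasks last_executed none

-- ===== PRECONDITION & SPEC =====
-- Pre_ excludes association lists with duplicate task names: a Python dict cannot hold duplicate keys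
-- (the list is its Lean image), and on such lists A's dict-lookup (first match) versus the per-entry
-- data makes either answer accidental.
def Pre_find_next_task_py (all_tasks : List (String × List (String × List String))) (executed_tasks : List String) (last_executed : Option String) : Prop :=
  (all_tasks.map Prod.fst).Nodup
instance (all_tasks : List (String × List (String × List String))) (executed_tasks : List String) (last_executed : Option String) : Decidable (Pre_find_next_task_py all_tasks executed_tasks last_executed) := by unfold Pre_find_next_task_py; infer_instance

def pvWitness_find_next_task_py : (List (String × List (String × List String))) × List String × Option String :=
  ([("a", [("dependencies", [])]), ("b", [("dependencies", ["a"])])], ["a"], some "a")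

def Spec_find_next_task_py (all_tasks : List (String × List (String × List String))) (executed_tasks : List String) (last_executed : Option String) (out : Option String) : Prop := out = find_next_task_py_alt all_tasks executed_tasks last_executed
instance (all_tasks : List (String × List (String × List String))) (executed_tasks : List String) (last_executed : Option String) (out : Option String) : Decidable (Spec_find_next_task_py all_tasks executed_tasks last_executed out) := by unfold Spec_find_next_task_py; infer_instance

-- ===== CLAIM (what is proved, stated in full; the proofs are below) =====
def Claim_equal_find_next_task_py : Prop := ∀ (all_tasks : List (String × List (String × List String))) (executed_tasks : List String) (last_executed : Option String), Dom_find_next_task_py all_tasks executed_tasks last_executed → Pre_find_next_task_py all_tasks executed_tasks last_executed → Spec_find_next_task_py all_tasks executed_tasks last_executed (find_next_task_py all_tasks executed_tasks last_executed)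

-- ===== LEMMAS AND PROOFS =====

-- phase 2 of A, rewritten to use each entry's own data (valid when keys are distinct)
def pvPhase2' (items : List (String × List (String × List String))) (executed_tasks : List String) : Option String :=
  match items with
  | [] => none
  | (name, data) :: rest =>
    if !executed_tasks.contains name && (pvGetDeps data).all (fun dep => executed_tasks.contains dep) then some name
    else pvPhase2' rest executed_tasks

theorem pvLookup_of_mem {all : List (String × List (String × List String))}
    (hnd : (all.map Prod.fst).Nodup) {p : String × List (String × List String)} (hm : p ∈ all) :
    all.find? (fun q => q.1 == p.1) = some p := by
  induction all with
  | nil => cases hm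
  | cons hd tl ih =>
    simp only [List.map_cons, List.nodup_cons] at hnd
    rcases List.mem_cons.mp hm with h | h
    · subst h; simp [List.find?]
    · have hne : (hd.1 == p.1) = false := by
        have : p.1 ∈ tl.map Prod.fst := List.mem_map.mpr ⟨p, h, rfl⟩
        simp only [beq_eq_false_iff_ne]
        intro he; exact hnd.1 (he ▸ this)
      simp [List.find?, hne, ih hnd.2 h]

theorem pvPhase2_eq (all items : List (String × List (String × List String))) (executed : List String)
    (h : ∀ p ∈ items, all.find? (fun q => q.1 == p.1) = some p) :
    pvPhase2 all items executed = pvPhase2' items executed := by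
  induction items with
  | nil => rfl
  | cons hd tl ih =>
    obtain ⟨name, data⟩ := hd
    have hhd := h (name, data) (List.mem_cons_self)
    have htl : ∀ p ∈ tl, all.find? (fun q => q.1 == p.1) = some p :=
      fun p hp => h p (List.mem_cons_of_mem _ hp)
    by_cases he : name ∈ executed <;>
      simp [pvPhase2, pvPhase2', hhd, he, ih htl]

-- the single pass when last_executed is none
theorem pvBLoop_none (executed : List String)
    (items : List (String × List (String × List String))) (fb : Option String) :
    pvBLoop items executed none fb = fb.or (pvPhase2' items executed) := by
  induction items generalizing fb with
  | nil => cases fb <;> simp [pvBLoop, pvPhase2', Option.or]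
  | cons hd tl ih =>
    obtain ⟨name, data⟩ := hd
    by_cases he : name ∈ executed
    · simp [pvBLoop, pvPhase2', he, ih]
    · by_cases hr : ∀ dep ∈ pvGetDeps data, dep ∈ executed
      · have hr' : ¬ ∃ x ∈ pvGetDeps data, x ∉ executed := by push_neg; exact hr
        rw [show pvBLoop ((name, data) :: tl) executed none fb
              = pvBLoop tl executed none (match fb with | none => some name | some _ => fb) by
            simp [pvBLoop, he, hr, hr']]
        rw [ih]
        have h2 : pvPhase2' ((name, data) :: tl) executed = some name := by simp [pvPhase2', he, hr, hr']
        rw [h2]; cases fb <;> simp [Option.or]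
      · have hr' : ∃ x ∈ pvGetDeps data, x ∉ executed := by push_neg at hr; exact hr
        simp [pvBLoop, pvPhase2', he, hr, hr', ih]

-- the single pass when last_executed is the falsy string ""
theorem pvBLoop_empty (executed : List String)
    (items : List (String × List (String × List String))) (fb : Option String) :
    pvBLoop items executed (some "") fb = fb.or (pvPhase2' items executed) := by
  induction items generalizing fb with
  | nil => cases fb <;> simp [pvBLoop, pvPhase2', Option.or]
  | cons hd tl ih =>
    obtain ⟨name, data⟩ := hd
    by_cases he : name ∈ executed
    · simp [pvBLoop, pvPhase2', he, ih]
    · by_cases hr : ∀ dep ∈ pvGetDeps data, dep ∈ executed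
      · have hr' : ¬ ∃ x ∈ pvGetDeps data, x ∉ executed := by push_neg; exact hr
        rw [show pvBLoop ((name, data) :: tl) executed (some "") fb
              = pvBLoop tl executed (some "") (match fb with | none => some name | some _ => fb) by
            simp [pvBLoop, he, hr, hr']]
        rw [ih]
        have h2 : pvPhase2' ((name, data) :: tl) executed = some name := by simp [pvPhase2', he, hr, hr']
        rw [h2]; cases fb <;> simp [Option.or]
      · have hr' : ∃ x ∈ pvGetDeps data, x ∉ executed := by push_neg at hr; exact hr
        simp [pvBLoop, pvPhase2', he, hr, hr', ih]

-- the single pass with a truthy last_executed: phase 1's result, else fallback, else phase 2's result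
theorem pvBLoop_truthy (executed : List String) (l : String) (hl : l ≠ "")
    (items : List (String × List (String × List String))) (fb : Option String) :
    pvBLoop items executed (some l) fb =
      (pvPhase1 items executed l).or (fb.or (pvPhase2' items executed)) := by
  induction items generalizing fb with
  | nil => cases fb <;> simp [pvBLoop, pvPhase1, pvPhase2', Option.or]
  | cons hd tl ih =>
    obtain ⟨name, data⟩ := hd
    by_cases he : name ∈ executed
    · simp [pvBLoop, pvPhase1, pvPhase2', he, ih]
    · by_cases hr : ∀ dep ∈ pvGetDeps data, dep ∈ executed
      · have hr' : ¬ ∃ x ∈ pvGetDeps data, x ∉ executed := by push_neg; exact hr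
        by_cases hc : l ∈ pvGetDeps data
        · -- ready and depends on last: immediate return on both sides
          have c2 : ((pvGetDeps data).all (fun dep => executed.contains dep)) = true := by
            simpa using hr
          have c1 : (!executed.contains name && (pvGetDeps data).contains l) = true := by
            simp [he, hc]
          have hA : pvPhase1 ((name, data) :: tl) executed l = some name := by
            simp only [pvPhase1]
            rw [c1, c2]
            simp
          have hB : pvBLoop ((name, data) :: tl) executed (some l) fb = some name := by
            simp [pvBLoop, he, hr', hc, hl]
          rw [hA, hB, Option.or]
        · -- ready but not depending: recorded as the fallback
          rw [show pvBLoop ((name, data) :: tl) executed (some l) fb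
                = pvBLoop tl executed (some l) (match fb with | none => some name | some _ => fb) by
              simp [pvBLoop, he, hr, hr', hc]]
          rw [ih]
          have h1 : pvPhase1 ((name, data) :: tl) executed l = pvPhase1 tl executed l := by
            simp [pvPhase1, hc]
          have h2 : pvPhase2' ((name, data) :: tl) executed = some name := by
            simp [pvPhase2', he, hr, hr']
          rw [h1, h2]
          cases fb <;> cases hp : pvPhase1 tl executed l <;> simp [Option.or]
      · have hr' : ∃ x ∈ pvGetDeps data, x ∉ executed := by push_neg at hr; exact hr
        simp [pvBLoop, pvPhase1, pvPhase2', he, hr, hr', ih]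

-- ===== VERDICT (by name: the statement is the Claim_ definition above) =====
theorem find_next_task_py_spec : Claim_equal_find_next_task_py := by
  intro all_tasks executed_tasks last_executed _hdom hpre
  unfold Spec_find_next_task_py find_next_task_py find_next_task_py_alt
  have h2 : pvPhase2 all_tasks all_tasks executed_tasks = pvPhase2' all_tasks executed_tasks :=
    pvPhase2_eq all_tasks all_tasks executed_tasks (fun p hp => pvLookup_of_mem hpre hp)
  cases last_executed with
  | none =>
    rw [pvBLoop_none]
    simp [h2, Option.or]
  | some l =>
    by_cases hl : l = ""
    · subst hl
      rw [pvBLoop_empty]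
      simp [h2, Option.or]
    · rw [pvBLoop_truthy executed_tasks l hl]
      simp only [ne_eq, hl, not_false_eq_true, if_true]
      cases hp : pvPhase1 all_tasks executed_tasks l <;> simp [hp, h2, Option.or]
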